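-- pv_equiv track=rewrite | github.com/LeHTVy/rutx | firestarter/utils/input_normalizer.py | _looks_like_has_target
-- ===== SOURCE A (Python) =====
-- def _looks_like_has_target(text: str) -> bool:
--     """Check if text looks like it mentions a target (semantic pattern, not keyword).
--
--     Args:
--         text: Input text
--
--     Returns:
--         True if text looks like it has a target mention
--     """
--     # Pattern: action verb followed by a word (potential target)
--     # This is semantic pattern matching, not keyword detection
--     words = text.split()
--     if len(words) < 2:
--         return False
--
--     # Check if there's a verb-like word followed by another word
--     for i in range(len(words) - 1):
--         word1 = words[i].lower()
--         word2 = words[i + 1]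
--
--         # Check if word1 looks like a verb (semantic pattern)
--         verb_like = (len(word1) > 2 and
--                     word1.isalpha() and
--                     not word1[0].isupper())
--
--         # Check if word2 looks like a target (proper noun or significant word)
--         target_like = (len(word2) > 3 and
--                       word2.replace('-', '').isalnum())
--
--         if verb_like and target_like:
--             return True
--
--     return False
-- ===== SOURCE B (Python) =====
-- def _looks_like_has_target(text: str) -> bool:
--     # Streaming character-level state machine: never builds the word list;
--     # word properties are accumulated per character and combined at each
--     # whitespace boundary (and once at the end for the last word).
--     prev_verb = False   # previous completed word was verb-like
--     found = False
--     n = 0               # length of the word currently being scanned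
--     all_alpha = True    # every char of the current word is alphabetic
--     rest_alnum = True   # every non-hyphen char of the current word is alphanumeric
--     nonhyphen = 0       # number of non-hyphen chars in the current word
--     for c in text:
--         if c.isspace():
--             if n > 0:
--                 if prev_verb and n > 3 and nonhyphen > 0 and rest_alnum:
--                     found = True
--                 prev_verb = n > 2 and all_alpha
--                 n = 0
--                 all_alpha = True
--                 rest_alnum = True
--                 nonhyphen = 0
--         else:
--             n += 1
--             if not c.isalpha():
--                 all_alpha = False
--             if c != '-':
--                 nonhyphen += 1
--                 if not c.isalnum():
--                     rest_alnum = False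
--     if n > 0 and prev_verb and n > 3 and nonhyphen > 0 and rest_alnum:
--         found = True
--     return found
-- ===== Notes on version B (the rewrite author's own statement) =====
-- stated objective: alternative
-- what changed: A splits the text into a word list and runs an indexed loop testing a verb/target predicate on each adjacent word pair; B never builds a word list: it is a single character-level state machine that accumulates per-word properties (length, all-alphabetic, non-hyphen-alnum, non-hyphen count) char by char and folds them into a previous-word-was-verb-like flag at each whitespace boundary.
import Mathlib
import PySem

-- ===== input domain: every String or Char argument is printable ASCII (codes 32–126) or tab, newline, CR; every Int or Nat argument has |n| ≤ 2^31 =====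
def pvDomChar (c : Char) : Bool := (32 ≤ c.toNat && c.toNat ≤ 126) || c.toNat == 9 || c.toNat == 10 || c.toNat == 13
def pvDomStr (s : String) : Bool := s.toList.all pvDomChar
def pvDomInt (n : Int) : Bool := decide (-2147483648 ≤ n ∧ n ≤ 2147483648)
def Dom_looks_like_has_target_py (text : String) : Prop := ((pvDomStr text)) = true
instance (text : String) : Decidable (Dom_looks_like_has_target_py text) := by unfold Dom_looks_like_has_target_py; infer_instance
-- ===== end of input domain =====

-- B replaces A's word-list + adjacent-pair loop by a character-level state machine (alternative decomposition, same cost).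


-- ===== PORT A =====
-- words from str.split() are never empty, so `word1[0]` cannot raise; the `none` arm below is unreachable.
def looks_like_has_target_py (text : String) : Bool :=
  let words := PySem.Str.split₀ text
  if words.length < 2 then false
  else
    (PySem.List.pyRange 0 ((words.length : Int) - 1) 1).any (fun i =>
      let word1 := PySem.Str.lower (PySem.List.pyGetD words i "")
      let word2 := PySem.List.pyGetD words (i + 1) ""
      let verb_like := decide (2 < PySem.Str.len word1) && PySem.Str.strIsalpha word1 &&
        !(match PySem.Str.pyGet? word1 0 with | some c => PySem.Chars.isupper c | none => false)
      let target_like := decide (3 < PySem.Str.len word2) &&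
        PySem.Str.strIsalnum (PySem.Str.replace word2 "-" "")
      verb_like && target_like)

-- ===== PORT B =====
-- the `for c in text` loop of Source B, carrying (prev_verb, found, n, all_alpha, rest_alnum, nonhyphen)
def altScan : List Char → Bool → Bool → Nat → Bool → Bool → Nat → Bool
  | [], _prevVerb, found, n, _allAlpha, restAlnum, nonhyphen =>
      -- final flush of Source B: `if n > 0 and prev_verb and n > 3 and nonhyphen > 0 and rest_alnum`
      found || (decide (0 < n) && _prevVerb && decide (3 < n) && decide (0 < nonhyphen) && restAlnum)
  | c :: rest, prevVerb, found, n, allAlpha, restAlnum, nonhyphen =>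
      if PySem.Chars.isspace c then
        if 0 < n then
          altScan rest (decide (2 < n) && allAlpha)
            (found || (prevVerb && decide (3 < n) && decide (0 < nonhyphen) && restAlnum))
            0 true true 0
        else
          altScan rest prevVerb found n allAlpha restAlnum nonhyphen
      else
        altScan rest prevVerb found (n + 1)
          (allAlpha && PySem.Chars.isalpha c)
          (if c != '-' then restAlnum && PySem.Chars.isalnum c else restAlnum)
          (if c != '-' then nonhyphen + 1 else nonhyphen)

def looks_like_has_target_py_alt (text : String) : Bool :=
  altScan text.toList false false 0 true true 0

-- ===== PRECONDITION & SPEC =====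
def Spec_looks_like_has_target_py (text : String) (out : Bool) : Prop := out = looks_like_has_target_py_alt text
instance (text : String) (out : Bool) : Decidable (Spec_looks_like_has_target_py text out) := by unfold Spec_looks_like_has_target_py; infer_instance

-- ===== CLAIM (what is proved, stated in full; the proofs are below) =====
def Claim_equal_looks_like_has_target_py : Prop := ∀ (text : String), Dom_looks_like_has_target_py text → Spec_looks_like_has_target_py text (looks_like_has_target_py text)

-- ===== LEMMAS AND PROOFS =====

-- ---- character facts (the PySem char classifiers are plain range tests) ----
theorem toNat_ofNat_small (n : Nat) (h : n < 55296) : (Char.ofNat n).val.toNat = n := by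
  show (Char.ofNat n).toNat = n
  rw [Char.toNat_ofNat]
  simp [Nat.isValidChar, h]

theorem chA : ('A').val.toNat = 65 := rfl
theorem chZ : ('Z').val.toNat = 90 := rfl
theorem cha : ('a').val.toNat = 97 := rfl
theorem chz : ('z').val.toNat = 122 := rfl
theorem chT (c : Char) : c.toNat = c.val.toNat := rfl

theorem isupper_lowerChar (c : Char) : PySem.Chars.isupper (PySem.Chars.lowerChar c) = false := by
  unfold PySem.Chars.lowerChar
  split
  · next h =>
    simp only [PySem.Chars.isupper, Char.le_def, UInt32.le_iff_toNat_le, Bool.and_eq_true,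
      decide_eq_true_eq, chA, chZ] at h
    simp only [PySem.Chars.isupper, Char.le_def, UInt32.le_iff_toNat_le,
      Bool.and_eq_false_iff, decide_eq_false_iff_not, chA, chZ, chT]
    rw [toNat_ofNat_small (c.val.toNat + 32) (by omega)]
    omega
  · next h => simpa [PySem.Chars.isupper] using h

theorem isalpha_lowerChar (c : Char) : PySem.Chars.isalpha (PySem.Chars.lowerChar c) = PySem.Chars.isalpha c := by
  unfold PySem.Chars.lowerChar
  split
  · next h =>
    simp only [PySem.Chars.isupper, Char.le_def, UInt32.le_iff_toNat_le, Bool.and_eq_true,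
      decide_eq_true_eq, chA, chZ] at h
    simp only [PySem.Chars.isalpha, PySem.Chars.isupper, PySem.Chars.islower, Char.le_def,
      UInt32.le_iff_toNat_le, chA, chZ, cha, chz, chT]
    rw [toNat_ofNat_small (c.val.toNat + 32) (by omega)]
    rw [Bool.eq_iff_iff]
    simp only [Bool.or_eq_true, Bool.and_eq_true, decide_eq_true_eq]
    omega
  · rfl

-- ---- `w.replace('-','')` is a filter ----
theorem replace_go_dash (l : List Char) : ∀ (fuel : Nat) (acc : List Char), l.length ≤ fuel →
    PySem.Chars.replace.go ['-'] [] fuel l acc = acc.reverse ++ l.filter (fun c => c != '-') := by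
  induction l with
  | nil =>
    intro fuel acc _
    cases fuel <;> simp [PySem.Chars.replace.go]
  | cons c t ih =>
    intro fuel acc hle
    cases fuel with
    | zero => simp at hle
    | succ f =>
      by_cases hc : c = '-'
      · subst hc
        rw [show PySem.Chars.replace.go ['-'] [] (f + 1) ('-' :: t) acc
              = PySem.Chars.replace.go ['-'] [] f t acc by
            simp [PySem.Chars.replace.go, List.isPrefixOf]]
        rw [ih f acc (by simpa using hle)]
        simp
      · rw [show PySem.Chars.replace.go ['-'] [] (f + 1) (c :: t) acc
              = PySem.Chars.replace.go ['-'] [] f t (c :: acc) by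
            have hne : ('-' == c) = false := beq_eq_false_iff_ne.mpr (Ne.symm hc)
            simp [PySem.Chars.replace.go, List.isPrefixOf, hne]]
        rw [ih f (c :: acc) (by simpa using hle)]
        simp [hc]

theorem replace_dash (w : List Char) :
    PySem.Chars.replace w ['-'] [] = w.filter (fun c => c != '-') := by
  unfold PySem.Chars.replace
  simpa using replace_go_dash w w.length [] le_rfl

-- ---- canonical per-word predicates (what A tests on each word, phrased on List Char) ----
def verbP (w : List Char) : Bool := decide (2 < w.length) && w.all PySem.Chars.isalpha
def targP (w : List Char) : Bool :=
  decide (3 < w.length) && decide (0 < (w.filter (fun c => c != '-')).length) &&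
    (w.filter (fun c => c != '-')).all PySem.Chars.isalnum

theorem verbS_ofList (w : List Char) :
    (decide (2 < PySem.Str.len (PySem.Str.lower (String.ofList w))) &&
      PySem.Str.strIsalpha (PySem.Str.lower (String.ofList w)) &&
      !(match PySem.Str.pyGet? (PySem.Str.lower (String.ofList w)) 0 with
        | some c => PySem.Chars.isupper c | none => false)) = verbP w := by
  have h3 : (match PySem.Str.pyGet? (PySem.Str.lower (String.ofList w)) 0 with
        | some c => PySem.Chars.isupper c | none => false) = false := by
    cases w with
    | nil => simp [PySem.Str.pyGet?, PySem.Str.lower, PySem.Chars.lower, PySem.Chars.pyGet?,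
        PySem.List.pyGet?, PySem.List.pyIdx?]
    | cons c t =>
      simp [PySem.Str.pyGet?, PySem.Str.lower, PySem.Chars.lower, PySem.List.pyGet?,
        PySem.List.pyIdx?, isupper_lowerChar]
  rw [h3]
  simp only [Bool.not_false, Bool.and_true]
  simp only [PySem.Str.len, PySem.Str.lower, PySem.Str.strIsalpha, String.toList_ofList,
    PySem.Chars.lower, PySem.Chars.strIsalpha, List.length_map, List.all_map, List.isEmpty_map]
  by_cases h : 2 < w.length
  · have : w.isEmpty = false := by
      cases w <;> simp_all
    have hf : (PySem.Chars.isalpha ∘ PySem.Chars.lowerChar) = PySem.Chars.isalpha :=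
      funext fun c => isalpha_lowerChar c
    simp [h, this, verbP, hf]
  · simp [h, verbP]

theorem targS_ofList (w : List Char) :
    (decide (3 < PySem.Str.len (String.ofList w)) &&
      PySem.Str.strIsalnum (PySem.Str.replace (String.ofList w) "-" "")) = targP w := by
  have hrep : (PySem.Str.replace (String.ofList w) "-" "").toList
      = w.filter (fun c => c != '-') := by
    simp only [PySem.Str.replace, String.toList_ofList]
    rw [show ("-" : String).toList = ['-'] from rfl, show ("" : String).toList = [] from rfl]
    exact replace_dash w
  simp only [PySem.Str.len, PySem.Str.strIsalnum, String.toList_ofList, PySem.Chars.strIsalnum,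
    hrep, targP]
  rw [Bool.and_assoc]
  have hiso : (!(w.filter (fun c => c != '-')).isEmpty)
      = decide (0 < (w.filter (fun c => c != '-')).length) := by
    cases hF : w.filter (fun c => c != '-') <;> simp
  congr 1
  · simp
  · rw [hiso]
def wordScan : List (List Char) → Bool → Bool → Bool
  | [], _, fnd => fnd
  | w :: ws, pv, fnd => wordScan ws (verbP w) (fnd || (pv && targP w))
def headTargP : List (List Char) → Bool
  | [] => false
  | w :: _ => targP w
def pairsAny (ws : List (List Char)) : Bool :=
  (ws.zip (ws.drop 1)).any (fun p => verbP p.1 && targP p.2)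

theorem wordScan_eq (ws : List (List Char)) : ∀ (pv fnd : Bool),
    wordScan ws pv fnd = ((fnd || (pv && headTargP ws)) || pairsAny ws) := by
  induction ws with
  | nil => intro pv fnd; simp [wordScan, headTargP, pairsAny]
  | cons w ws ih =>
    intro pv fnd
    rw [wordScan, ih]
    cases ws with
    | nil =>
      simp [headTargP, pairsAny, Bool.or_assoc]
    | cons w2 ws' =>
      simp only [headTargP, pairsAny, List.drop_succ_cons, List.drop_zero, List.zip_cons_cons,
        List.any_cons]
      cases fnd <;> cases pv <;> simp [Bool.or_assoc, Bool.or_comm, Bool.or_left_comm]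
theorem go_acc (cs : List Char) : ∀ (cur : List Char) (acc : List (List Char)),
    PySem.Chars.split₀.go cs cur acc = acc.reverse ++ PySem.Chars.split₀.go cs cur [] := by
  induction cs with
  | nil =>
    intro cur acc
    by_cases h : cur.isEmpty <;> simp [PySem.Chars.split₀.go, h]
  | cons c rest ih =>
    intro cur acc
    by_cases hs : PySem.Chars.isspace c
    · by_cases h : cur.isEmpty
      · simp only [PySem.Chars.split₀.go, hs, h, if_true]
        exact ih [] acc
      · simp only [PySem.Chars.split₀.go, hs, h, if_true, if_false]
        rw [ih [] (cur.reverse :: acc), ih [] [cur.reverse]]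
        simp
    · simp only [PySem.Chars.split₀.go, hs, if_false]
      exact ih (c :: cur) acc
theorem verbP_reverse (w : List Char) : verbP w.reverse = verbP w := by simp [verbP]
theorem targP_reverse (w : List Char) : targP w.reverse = targP w := by simp [targP]

theorem scan_eq (cs : List Char) : ∀ (cur : List Char) (pv fnd : Bool),
    altScan cs pv fnd cur.length (cur.all PySem.Chars.isalpha)
        ((cur.filter (fun c => c != '-')).all PySem.Chars.isalnum)
        (cur.filter (fun c => c != '-')).length
      = wordScan (PySem.Chars.split₀.go cs cur []) pv fnd := by
  induction cs with
  | nil =>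
    intro cur pv fnd
    cases cur with
    | nil => simp [altScan, PySem.Chars.split₀.go, wordScan]
    | cons x t =>
      simp only [altScan, List.length_cons]
      rw [show PySem.Chars.split₀.go [] (x :: t) [] = [(x :: t).reverse] by
          simp [PySem.Chars.split₀.go]]
      simp only [wordScan, targP_reverse]
      cases pv <;> cases fnd <;> simp [targP, Bool.and_assoc]
  | cons c rest ih =>
    intro cur pv fnd
    by_cases hs : PySem.Chars.isspace c = true
    · cases cur with
      | nil =>
        simp only [altScan, hs, if_true, List.length_nil, Nat.lt_irrefl, if_false]
        rw [show PySem.Chars.split₀.go (c :: rest) [] [] = PySem.Chars.split₀.go rest [] [] by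
            simp [PySem.Chars.split₀.go, hs]]
        simpa using ih [] pv fnd
      | cons x t =>
        rw [show altScan (c :: rest) pv fnd (x :: t).length ((x :: t).all PySem.Chars.isalpha)
              (((x :: t).filter (fun c => c != '-')).all PySem.Chars.isalnum)
              ((x :: t).filter (fun c => c != '-')).length
            = altScan rest (decide (2 < (x :: t).length) && (x :: t).all PySem.Chars.isalpha)
                (fnd || (pv && decide (3 < (x :: t).length) &&
                  decide (0 < ((x :: t).filter (fun c => c != '-')).length) &&
                  ((x :: t).filter (fun c => c != '-')).all PySem.Chars.isalnum))
                0 true true 0 by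
            simp [altScan, hs]]
        have h := ih [] (decide (2 < (x :: t).length) && (x :: t).all PySem.Chars.isalpha)
          (fnd || (pv && decide (3 < (x :: t).length) &&
            decide (0 < ((x :: t).filter (fun c => c != '-')).length) &&
            ((x :: t).filter (fun c => c != '-')).all PySem.Chars.isalnum))
        simp only [List.length_nil, List.all_nil, List.filter_nil] at h
        rw [show PySem.Chars.split₀.go (c :: rest) (x :: t) []
              = PySem.Chars.split₀.go rest [] [(x :: t).reverse] by
            simp [PySem.Chars.split₀.go, hs]]
        rw [go_acc rest [] [(x :: t).reverse]]
        rw [show ([(x :: t).reverse] : List (List Char)).reverse ++ PySem.Chars.split₀.go rest [] []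
              = (x :: t).reverse :: PySem.Chars.split₀.go rest [] [] by simp]
        rw [wordScan, verbP_reverse, targP_reverse]
        have e1 : verbP (x :: t) = (decide (2 < (x :: t).length) && (x :: t).all PySem.Chars.isalpha) := rfl
        have e2 : (fnd || (pv && targP (x :: t)))
            = (fnd || (pv && decide (3 < (x :: t).length) &&
                decide (0 < ((x :: t).filter (fun c => c != '-')).length) &&
                ((x :: t).filter (fun c => c != '-')).all PySem.Chars.isalnum)) := by
          cases pv <;> cases fnd <;> simp [targP, Bool.and_assoc]
        rw [e1, e2]
        exact h
    · have hsf : PySem.Chars.isspace c = false := by simpa using hs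
      have h := ih (c :: cur) pv fnd
      rw [show PySem.Chars.split₀.go (c :: rest) cur [] = PySem.Chars.split₀.go rest (c :: cur) [] by
          simp [PySem.Chars.split₀.go, hsf]]
      rw [← h]
      rw [show altScan (c :: rest) pv fnd cur.length (cur.all PySem.Chars.isalpha)
            ((cur.filter (fun c => c != '-')).all PySem.Chars.isalnum)
            (cur.filter (fun c => c != '-')).length
          = altScan rest pv fnd (cur.length + 1)
              (cur.all PySem.Chars.isalpha && PySem.Chars.isalpha c)
              (if c != '-' then (cur.filter (fun c => c != '-')).all PySem.Chars.isalnum && PySem.Chars.isalnum c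
               else (cur.filter (fun c => c != '-')).all PySem.Chars.isalnum)
              (if c != '-' then (cur.filter (fun c => c != '-')).length + 1
               else (cur.filter (fun c => c != '-')).length) by
          simp [altScan, hsf]]
      congr 1
      · simp [Bool.and_comm]
      · by_cases hd : (c != '-') = true <;> simp [hd, List.filter_cons, Bool.and_comm]
      · by_cases hd : (c != '-') = true <;> simp [hd, List.filter_cons]
theorem anyAdj_eq {α : Type} [Inhabited α] (g : α → α → Bool) (d : α) (xs : List α) :
    ((PySem.List.pyRange 0 ((xs.length : Int) - 1) 1).any (fun i =>
        g (PySem.List.pyGetD xs i d) (PySem.List.pyGetD xs (i + 1) d)))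
    = (xs.zip (xs.drop 1)).any (fun p => g p.1 p.2) := by
  rw [Bool.eq_iff_iff, List.any_eq_true, List.any_eq_true]
  constructor
  · rintro ⟨i, hi, hg⟩
    rw [PySem.List.mem_pyRange_one] at hi
    obtain ⟨h0i, hlt⟩ := hi
    have hlen : i.toNat + 1 < xs.length := by omega
    have e1 : PySem.List.pyGetD xs i d = xs[i.toNat]'(by omega) :=
      PySem.List.pyGetD_eq_getElem xs d h0i (by omega)
    have e2 : PySem.List.pyGetD xs (i + 1) d = xs[i.toNat + 1]'hlen := by
      rw [PySem.List.pyGetD_eq_getElem xs d (by omega) (by omega)]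
      congr 1; omega
    refine ⟨(xs[i.toNat]'(by omega), xs[i.toNat + 1]'hlen), ?_, ?_⟩
    · rw [List.mem_iff_getElem]
      refine ⟨i.toNat, by simp [List.length_zip]; omega, ?_⟩
      simp [List.getElem_zip]
    · rw [e1, e2] at hg; exact hg
  · rintro ⟨p, hp, hg⟩
    rw [List.mem_iff_getElem] at hp
    obtain ⟨j, hj, hpj⟩ := hp
    have hj' : j + 1 < xs.length := by
      simp [List.length_zip] at hj; omega
    refine ⟨(j : Int), ?_, ?_⟩
    · rw [PySem.List.mem_pyRange_one]; omega
    · have e1 : PySem.List.pyGetD xs (j : Int) d = xs[j]'(by omega) :=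
        PySem.List.pyGetD_eq_getElem xs d (by omega) (by omega)
      have e2 : PySem.List.pyGetD xs ((j : Int) + 1) d = xs[j + 1]'hj' := by
        rw [PySem.List.pyGetD_eq_getElem xs d (by omega) (by omega)]
        simp
      rw [e1, e2]
      subst hpj
      simpa [List.getElem_zip] using hg

theorem mapAny_eq (wsC : List (List Char)) :
    (((wsC.map String.ofList).zip ((wsC.map String.ofList).drop 1)).any (fun p =>
      (decide (2 < PySem.Str.len (PySem.Str.lower p.1)) && PySem.Str.strIsalpha (PySem.Str.lower p.1) &&
        !(match PySem.Str.pyGet? (PySem.Str.lower p.1) 0 with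
          | some c => PySem.Chars.isupper c | none => false)) &&
      (decide (3 < PySem.Str.len p.2) && PySem.Str.strIsalnum (PySem.Str.replace p.2 "-" ""))))
    = pairsAny wsC := by
  rw [← List.map_drop, List.zip_map, List.any_map]
  unfold pairsAny
  congr 1
  funext p
  simp only [Function.comp, Prod.map]
  exact congrArg₂ (· && ·) (verbS_ofList p.1) (targS_ofList p.2)

theorem main_eq (text : String) :
    looks_like_has_target_py text = looks_like_has_target_py_alt text := by
  unfold looks_like_has_target_py looks_like_has_target_py_alt
  simp only []
  have hscan := scan_eq text.toList [] false false
  simp only [List.length_nil, List.all_nil, List.filter_nil] at hscan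
  rw [hscan]
  rw [show PySem.Chars.split₀.go text.toList [] [] = PySem.Chars.split₀ text.toList from rfl]
  rw [wordScan_eq]
  simp only [Bool.false_and, Bool.and_false, Bool.or_false, Bool.false_or]
  by_cases hlen : (PySem.Str.split₀ text).length < 2
  · rw [if_pos hlen]
    have hlen' : (PySem.Chars.split₀ text.toList).length < 2 := by
      simpa [PySem.Str.split₀] using hlen
    rcases h2 : PySem.Chars.split₀ text.toList with _ | ⟨w, _ | ⟨w2, ws⟩⟩
    · simp [pairsAny]
    · simp [pairsAny]
    · rw [h2] at hlen'
      simp at hlen'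
  · rw [if_neg hlen]
    rw [anyAdj_eq (fun w1 w2 =>
      (decide (2 < PySem.Str.len (PySem.Str.lower w1)) && PySem.Str.strIsalpha (PySem.Str.lower w1) &&
        !(match PySem.Str.pyGet? (PySem.Str.lower w1) 0 with
          | some c => PySem.Chars.isupper c | none => false)) &&
      (decide (3 < PySem.Str.len w2) && PySem.Str.strIsalnum (PySem.Str.replace w2 "-" ""))) ""]
    rw [show PySem.Str.split₀ text = (PySem.Chars.split₀ text.toList).map String.ofList from rfl]
    exact mapAny_eq _

-- ===== VERDICT (by name: the statement is the Claim_ definition above) =====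
theorem looks_like_has_target_py_spec : Claim_equal_looks_like_has_target_py := by
  intro text _
  show looks_like_has_target_py text = looks_like_has_target_py_alt text
  exact main_eq text
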